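-- pv_equiv track=rewrite | github.com/hherb/bmlibrarian | src/bmlibrarian/agent.py | _validate_tsquery
-- ===== SOURCE A (Python) =====
-- def _validate_tsquery(query: str) -> bool:
--     """
--     Basic validation of to_tsquery format.
--
--     Args:
--         query: The query string to validate
--
--     Returns:
--         True if the query appears to be valid to_tsquery format
--     """
--     if not query:
--         return False
--
--     # Check for balanced parentheses
--     if query.count('(') != query.count(')'):
--         return False
--
--     # Check for valid operators
--     invalid_patterns = ['&&', '||', '&|', '|&']
--     for pattern in invalid_patterns:
--         if pattern in query:
--             return False
--
--     return True
-- ===== SOURCE B (Python) =====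
-- def _validate_tsquery(query: str) -> bool:
--     """Single pass: count both paren kinds and reject two adjacent operator chars."""
--     if not query:
--         return False
--     opens = 0
--     closes = 0
--     prev = None
--     for ch in query:
--         if ch == '(':
--             opens += 1
--         elif ch == ')':
--             closes += 1
--         if prev in ('&', '|') and ch in ('&', '|'):
--             return False
--         prev = ch
--     return opens == closes
-- ===== Notes on version B (the rewrite author's own statement) =====
-- stated objective: alternative
-- what changed: Replaces A's six separate string scans (two .count calls and four substring membership tests) by one explicit left-to-right pass that keeps two paren counters and the previous character, rejecting immediately on an adjacent operator pair.
import Mathlib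
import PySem

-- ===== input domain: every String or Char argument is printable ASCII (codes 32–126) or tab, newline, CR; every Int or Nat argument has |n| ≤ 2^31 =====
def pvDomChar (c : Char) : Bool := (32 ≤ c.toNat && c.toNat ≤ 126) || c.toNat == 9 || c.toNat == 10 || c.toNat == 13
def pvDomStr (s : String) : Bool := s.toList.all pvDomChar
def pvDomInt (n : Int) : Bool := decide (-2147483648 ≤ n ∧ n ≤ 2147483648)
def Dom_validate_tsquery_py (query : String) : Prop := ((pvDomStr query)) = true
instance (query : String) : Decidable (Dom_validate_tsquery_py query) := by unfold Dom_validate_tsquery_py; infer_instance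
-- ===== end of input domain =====

-- B replaces A's six separate string scans by one explicit pass with two paren counters and
-- the previous character (objective: alternative decomposition, same asymptotic cost).

-- ===== PORT A =====
-- the 'for pattern in invalid_patterns: if pattern in query: return False' loop
def aPatLoop (query : String) : List String → Bool
  | [] => true
  | p :: rest => if PySem.Str.isIn p query then false else aPatLoop query rest

def validate_tsquery_py (query : String) : Bool :=
  if query == "" then false
  else if PySem.Str.count query "(" ≠ PySem.Str.count query ")" then false
  else aPatLoop query ["&&", "||", "&|", "|&"]

-- ===== PORT B =====
def isOpB (c : Char) : Bool := c == '&' || c == '|'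

def prevOpB : Option Char → Bool
  | none => false
  | some p => isOpB p

-- the single for-loop of Source B: state = (opens, closes, prev)
def bLoop : List Char → Int → Int → Option Char → Bool
  | [], opens, closes, _ => opens == closes
  | c :: rest, opens, closes, prev =>
    let st := if c == '(' then (opens + 1, closes)
              else if c == ')' then (opens, closes + 1)
              else (opens, closes)
    if prevOpB prev && isOpB c then false
    else bLoop rest st.1 st.2 (some c)

def validate_tsquery_py_alt (query : String) : Bool :=
  if query == "" then false
  else bLoop query.toList 0 0 none

-- ===== PRECONDITION & SPEC =====
def Spec_validate_tsquery_py (query : String) (out : Bool) : Prop := out = validate_tsquery_py_alt query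
instance (query : String) (out : Bool) : Decidable (Spec_validate_tsquery_py query out) := by unfold Spec_validate_tsquery_py; infer_instance

-- ===== CLAIM (what is proved, stated in full; the proofs are below) =====
def Claim_equal_validate_tsquery_py : Prop := ∀ (query : String), Dom_validate_tsquery_py query → Spec_validate_tsquery_py query (validate_tsquery_py query)

-- ===== LEMMAS AND PROOFS =====

-- 'there is a forbidden adjacent operator pair', as B's loop detects it
def hasBad : Option Char → List Char → Bool
  | _, [] => false
  | prev, c :: rest => (prevOpB prev && isOpB c) || hasBad (some c) rest

def pairAdj : List Char → Bool
  | a :: b :: r => (isOpB a && isOpB b) || pairAdj (b :: r)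
  | _ => false

theorem count_go_single (c : Char) : ∀ (l : List Char) (fuel acc : Nat), l.length ≤ fuel →
    PySem.Chars.count.go [c] fuel l acc = acc + l.count c := by
  intro l
  induction l with
  | nil => intro fuel acc _; cases fuel <;> simp [PySem.Chars.count.go]
  | cons h t ih =>
    intro fuel acc hf
    cases fuel with
    | zero => simp at hf
    | succ f =>
      simp only [List.length_cons, Nat.succ_le_succ_iff] at hf
      by_cases hc : h = c
      · subst hc
        rw [show PySem.Chars.count.go [h] (f + 1) (h :: t) acc
              = PySem.Chars.count.go [h] f t (acc + 1) from by
          simp [PySem.Chars.count.go, List.isPrefixOf]]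
        rw [ih f (acc + 1) hf, List.count_cons]
        simp
        omega
      · rw [show PySem.Chars.count.go [c] (f + 1) (h :: t) acc
              = PySem.Chars.count.go [c] f t acc from by
          have : (c == h) = false := beq_eq_false_iff_ne.mpr (Ne.symm hc)
          simp [PySem.Chars.count.go, List.isPrefixOf, this]]
        rw [ih f acc hf, List.count_cons]
        simp [hc]

theorem chars_count_single (l : List Char) (c : Char) :
    PySem.Chars.count l [c] = l.count c := by
  have h := count_go_single c l l.length 0 (le_refl _)
  simp [PySem.Chars.count, h]

theorem count_open (q : String) : PySem.Str.count q "(" = q.toList.count '(' := by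
  rw [PySem.Str.count, show ("(" : String).toList = ['('] from rfl, chars_count_single]

theorem count_close (q : String) : PySem.Str.count q ")" = q.toList.count ')' := by
  rw [PySem.Str.count, show (")" : String).toList = [')'] from rfl, chars_count_single]

theorem bLoop_eq (l : List Char) : ∀ (o c : Int) (prev : Option Char),
    bLoop l o c prev =
      (!hasBad prev l && decide (o + (l.count '(' : Int) = c + (l.count ')' : Int))) := by
  induction l with
  | nil =>
    intro o c prev
    simp only [bLoop, hasBad, Bool.not_false, Bool.true_and, List.count_nil]
    rw [Bool.eq_iff_iff]
    simp
  | cons x rest ih =>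
    intro o c prev
    cases hb : (prevOpB prev && isOpB x) with
    | true => simp [bLoop, hasBad, hb]
    | false =>
      simp only [bLoop, hasBad, hb, Bool.false_or, Bool.false_eq_true, if_false]
      rw [ih]
      congr 1
      rw [decide_eq_decide]
      by_cases h1 : x = '('
      · simp only [h1, List.count_cons, beq_self_eq_true, if_true]
        push_cast
        constructor <;> intro <;> omega
      · by_cases h2 : x = ')'
        · have h1' : (x == '(') = false := beq_eq_false_iff_ne.mpr h1
          simp only [h2, List.count_cons, beq_self_eq_true, if_true]
          push_cast
          constructor <;> intro <;> omega
        · have h1' : (x == '(') = false := beq_eq_false_iff_ne.mpr h1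
          have h2' : (x == ')') = false := beq_eq_false_iff_ne.mpr h2
          simp [h1', h2', List.count_cons]

theorem hasBad_some (l : List Char) : ∀ p, hasBad (some p) l = pairAdj (p :: l) := by
  induction l with
  | nil => intro p; simp [hasBad, pairAdj]
  | cons c r ih => intro p; simp [hasBad, pairAdj, ih c, prevOpB]

theorem hasBad_none (l : List Char) : hasBad none l = pairAdj l := by
  cases l with
  | nil => rfl
  | cons c r => simp [hasBad, prevOpB, hasBad_some]

theorem pairAdj_iff (l : List Char) :
    pairAdj l = true ↔ ∃ a b, isOpB a = true ∧ isOpB b = true ∧ [a, b] <:+: l := by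
  induction l with
  | nil =>
    simp only [pairAdj, Bool.false_eq_true, false_iff]
    rintro ⟨a, b, _, _, h⟩
    have := h.sublist.length_le
    simp at this
  | cons x rest ih =>
    cases rest with
    | nil =>
      simp only [pairAdj, Bool.false_eq_true, false_iff]
      rintro ⟨a, b, _, _, h⟩
      have := h.sublist.length_le
      simp at this
    | cons y r =>
      simp only [pairAdj, Bool.or_eq_true, Bool.and_eq_true, ih]
      constructor
      · rintro (⟨ha, hb⟩ | ⟨a, b, ha, hb, h⟩)
        · exact ⟨x, y, ha, hb, ⟨[], r, by simp⟩⟩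
        · exact ⟨a, b, ha, hb, h.trans (List.suffix_cons x (y :: r)).isInfix⟩
      · rintro ⟨a, b, ha, hb, h⟩
        rw [List.infix_cons_iff] at h
        rcases h with ⟨t, ht⟩ | h
        · simp at ht
          obtain ⟨hx, hy, -⟩ := ht
          left; exact ⟨hx ▸ ha, hy ▸ hb⟩
        · right; exact ⟨a, b, ha, hb, h⟩

theorem isOpB_iff (a : Char) : isOpB a = true ↔ a = '&' ∨ a = '|' := by
  simp [isOpB]

theorem aPatLoop_eq (q : String) :
    aPatLoop q ["&&", "||", "&|", "|&"] = !pairAdj q.toList := by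
  have e1 : ("&&" : String).toList = ['&', '&'] := rfl
  have e2 : ("||" : String).toList = ['|', '|'] := rfl
  have e3 : ("&|" : String).toList = ['&', '|'] := rfl
  have e4 : ("|&" : String).toList = ['|', '&'] := rfl
  have hstep : aPatLoop q ["&&", "||", "&|", "|&"] =
      !(PySem.Chars.isIn ['&', '&'] q.toList || PySem.Chars.isIn ['|', '|'] q.toList ||
        PySem.Chars.isIn ['&', '|'] q.toList || PySem.Chars.isIn ['|', '&'] q.toList) := by
    cases h1 : PySem.Chars.isIn ['&', '&'] q.toList <;>
      cases h2 : PySem.Chars.isIn ['|', '|'] q.toList <;>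
      cases h3 : PySem.Chars.isIn ['&', '|'] q.toList <;>
      cases h4 : PySem.Chars.isIn ['|', '&'] q.toList <;>
      simp [aPatLoop, e1, e2, e3, e4, h1, h2, h3, h4]
  rw [hstep]
  congr 1
  rw [Bool.eq_iff_iff]
  simp only [Bool.or_eq_true, PySem.Chars.isIn_iff_infix, pairAdj_iff]
  constructor
  · rintro (((h | h) | h) | h)
    · exact ⟨'&', '&', rfl, rfl, h⟩
    · exact ⟨'|', '|', rfl, rfl, h⟩
    · exact ⟨'&', '|', rfl, rfl, h⟩
    · exact ⟨'|', '&', rfl, rfl, h⟩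
  · rintro ⟨a, b, ha, hb, h⟩
    rcases (isOpB_iff a).mp ha with rfl | rfl <;>
      rcases (isOpB_iff b).mp hb with rfl | rfl
    · exact Or.inl (Or.inl (Or.inl h))
    · exact Or.inl (Or.inr h)
    · exact Or.inr h
    · exact Or.inl (Or.inl (Or.inr h))

theorem ports_agree (query : String) :
    validate_tsquery_py query = validate_tsquery_py_alt query := by
  unfold validate_tsquery_py validate_tsquery_py_alt
  by_cases hq : query == ""
  · simp [hq]
  · simp only [hq, Bool.false_eq_true, if_false]
    rw [bLoop_eq, hasBad_none]
    split_ifs with hcnt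
    · have : ¬((query.toList.count '(' : Int) = (query.toList.count ')' : Int)) := by
        rw [count_open, count_close] at hcnt
        omega
      simp [this]
    · have : ((query.toList.count '(' : Int) = (query.toList.count ')' : Int)) := by
        rw [count_open, count_close] at hcnt
        have h := not_ne_iff.mp hcnt
        omega
      simp [this, aPatLoop_eq]

-- ===== VERDICT (by name: the statement is the Claim_ definition above) =====
theorem validate_tsquery_py_spec : Claim_equal_validate_tsquery_py := by
  intro query _
  unfold Spec_validate_tsquery_py
  exact ports_agree query
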